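-- pv_equiv track=rewrite | github.com/fabian20ro/generator-rebus | generator/rust_bridge.py | _metadata_by_word
-- ===== SOURCE A (Python) =====
-- def _metadata_by_word(raw_words: list[dict]) -> dict[str, list[dict]]:
--     metadata: dict[str, list[dict]] = {}
--     for word in raw_words:
--         normalized = word.get("normalized", "")
--         if not normalized:
--             continue
--         metadata.setdefault(normalized, []).append(word)
--     return metadata
-- ===== SOURCE B (Python) =====
-- def _metadata_by_word(raw_words: list[dict]) -> dict[str, list[dict]]:
--     keys: list[str] = []
--     seen: set[str] = set()
--     for word in raw_words:
--         k = word.get("normalized", "")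
--         if k and k not in seen:
--             seen.add(k)
--             keys.append(k)
--     return {k: [w for w in raw_words if w.get("normalized", "") == k] for k in keys}
-- ===== Notes on version B (the rewrite author's own statement) =====
-- stated objective: alternative
-- what changed: B replaces A's one-pass setdefault-append grouping with a two-phase scheme: a first pass collects the distinct non-empty normalized keys in first-occurrence order, then a per-key filter over the whole input builds each group.
import Mathlib
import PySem

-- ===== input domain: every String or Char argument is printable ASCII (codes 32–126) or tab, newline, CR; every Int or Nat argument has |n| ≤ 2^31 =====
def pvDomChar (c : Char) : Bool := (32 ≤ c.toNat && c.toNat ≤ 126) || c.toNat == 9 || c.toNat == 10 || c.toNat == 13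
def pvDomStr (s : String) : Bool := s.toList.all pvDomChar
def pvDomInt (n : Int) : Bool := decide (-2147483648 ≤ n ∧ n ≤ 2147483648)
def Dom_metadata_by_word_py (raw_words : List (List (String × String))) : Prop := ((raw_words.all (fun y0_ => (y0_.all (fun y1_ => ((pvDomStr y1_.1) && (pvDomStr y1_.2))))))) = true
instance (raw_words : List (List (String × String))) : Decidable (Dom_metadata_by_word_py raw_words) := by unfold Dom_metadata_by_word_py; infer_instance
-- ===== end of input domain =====

-- B groups by a different decomposition: first collect the distinct non-empty normalized keys
-- in first-occurrence order, then build each group by filtering the whole input per key (objective: alternative).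

-- word.get("normalized", "")
def pvKey (word : List (String × String)) : String :=
  (PySem.Dict.mk word).getD "normalized" ""

-- ===== PORT A =====
def metadata_by_word_py (raw_words : List (List (String × String))) : List (String × List (List (String × String))) :=
  (raw_words.foldl
    (fun (metadata : PySem.Dict String (List (List (String × String)))) word =>
      if pvKey word = "" then metadata
      else metadata.modify (pvKey word) [] (fun l => l ++ [word]))
    PySem.Dict.empty).items

-- ===== PORT B =====
def metadata_by_word_py_alt (raw_words : List (List (String × String))) : List (String × List (List (String × String))) :=
  let st := raw_words.foldl
    (fun (st : List String × PySem.Set String) word =>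
      if pvKey word ≠ "" ∧ ¬ PySem.Set.contains st.2 (pvKey word)
      then (st.1 ++ [pvKey word], PySem.Set.add st.2 (pvKey word)) else st)
    ([], PySem.Set.empty)
  st.1.map (fun k => (k, raw_words.filter (fun w => pvKey w == k)))

-- ===== PRECONDITION & SPEC =====
def Spec_metadata_by_word_py (raw_words : List (List (String × String))) (out : List (String × List (List (String × String)))) : Prop := out = metadata_by_word_py_alt raw_words
instance (raw_words : List (List (String × String))) (out : List (String × List (List (String × String)))) : Decidable (Spec_metadata_by_word_py raw_words out) := by unfold Spec_metadata_by_word_py; infer_instance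

-- ===== CLAIM (what is proved, stated in full; the proofs are below) =====
def Claim_equal_metadata_by_word_py : Prop := ∀ (raw_words : List (List (String × String))), Dom_metadata_by_word_py raw_words → Spec_metadata_by_word_py raw_words (metadata_by_word_py raw_words)

-- ===== LEMMAS AND PROOFS =====

-- B's two accumulators (ordered key list and the seen-set) stay equal, and together run the
-- one-accumulator "add the key if non-empty" loop.
theorem pvB_fold_pair (raw : List (List (String × String))) (s : List String) :
    raw.foldl
      (fun (st : List String × PySem.Set String) word =>
        if pvKey word ≠ "" ∧ ¬ PySem.Set.contains st.2 (pvKey word)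
        then (st.1 ++ [pvKey word], PySem.Set.add st.2 (pvKey word)) else st)
      (s, s)
    = (raw.foldl (fun s w => if pvKey w ≠ "" then PySem.Set.add s (pvKey w) else s) s,
       raw.foldl (fun s w => if pvKey w ≠ "" then PySem.Set.add s (pvKey w) else s) s) := by
  induction raw generalizing s with
  | nil => rfl
  | cons w t ih =>
    simp only [List.foldl_cons]
    have hstep :
        (if pvKey w ≠ "" ∧ ¬ PySem.Set.contains s (pvKey w)
           then (s ++ [pvKey w], PySem.Set.add s (pvKey w)) else (s, s))
        = ((if pvKey w ≠ "" then PySem.Set.add s (pvKey w) else s),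
           (if pvKey w ≠ "" then PySem.Set.add s (pvKey w) else s)) := by
      by_cases h1 : pvKey w = ""
      · simp [h1]
      · by_cases h2 : pvKey w ∈ s
        · simp [h1, h2, PySem.Set.add, PySem.Set.contains]
        · simp [h1, h2, PySem.Set.add, PySem.Set.contains]
    rw [hstep, ih]

-- The seen-key loop computes set(non-empty keys) in first-occurrence order.
theorem pvB_keys (raw : List (List (String × String))) :
    raw.foldl (fun s w => if pvKey w ≠ "" then PySem.Set.add s (pvKey w) else s) ([] : List String)
    = PySem.Set.ofList ((raw.filter (fun w => decide (pvKey w ≠ ""))).map pvKey) := by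
  rw [PySem.List.foldl_ite_eq_foldl_filter (p := fun w => pvKey w ≠ "")
      (f := fun s w => PySem.Set.add s (pvKey w))]
  rw [← List.foldl_map (f := pvKey) (g := PySem.Set.add)]
  rfl

-- A's loop, with the `continue` branch flipped, is the modify-loop over the filtered input.
theorem pvA_fold (raw : List (List (String × String))) :
    raw.foldl
      (fun (metadata : PySem.Dict String (List (List (String × String)))) word =>
        if pvKey word = "" then metadata
        else metadata.modify (pvKey word) [] (fun l => l ++ [word]))
      PySem.Dict.empty
    = (raw.filter (fun w => decide (pvKey w ≠ ""))).foldl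
        (fun metadata word => metadata.modify (pvKey word) [] (fun l => l ++ [word]))
        PySem.Dict.empty := by
  rw [PySem.List.foldl_congr_mem raw _
      (fun (metadata : PySem.Dict String (List (List (String × String)))) word =>
        if pvKey word ≠ "" then metadata.modify (pvKey word) [] (fun l => l ++ [word]) else metadata)
      PySem.Dict.empty
      (by intro acc x _; by_cases h : pvKey x = "" <;> simp [h])]
  rw [PySem.List.foldl_ite_eq_foldl_filter (p := fun w => pvKey w ≠ "")
      (f := fun (metadata : PySem.Dict String (List (List (String × String)))) word =>
        metadata.modify (pvKey word) [] (fun l => l ++ [word]))]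

-- ===== VERDICT (by name: the statement is the Claim_ definition above) =====
theorem metadata_by_word_py_spec : Claim_equal_metadata_by_word_py := by
  intro raw _
  show metadata_by_word_py raw = metadata_by_word_py_alt raw
  unfold metadata_by_word_py metadata_by_word_py_alt
  simp only [PySem.Set.empty]
  rw [pvB_fold_pair, pvB_keys, pvA_fold]
  set F := raw.filter (fun w => decide (pvKey w ≠ "")) with hF
  set d := F.foldl
      (fun (metadata : PySem.Dict String (List (List (String × String)))) word =>
        metadata.modify (pvKey word) [] (fun l => l ++ [word])) PySem.Dict.empty with hdd
  have hd : d = (F.map (fun w => (pvKey w, w))).foldl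
          (fun metadata p => metadata.modify p.1 [] (fun l => l ++ [p.2])) PySem.Dict.empty := by
    rw [hdd, List.foldl_map]
  have hnd : d.keys.Nodup := by
    rw [hdd]
    exact PySem.Dict.nodup_keys_foldl_modify_key F pvKey [] (fun _ w => fun l => l ++ [w])
      PySem.Dict.empty (by simp)
  have hkeys : d.keys = PySem.Set.ofList (F.map pvKey) := by
    rw [hdd, PySem.Dict.keys_foldl_modify_key F pvKey [] (fun _ w => fun l => l ++ [w])]
    rfl
  have hget : ∀ k, d.getD k [] = F.filter (fun w => pvKey w == k) := by
    intro k
    rw [hd, PySem.Dict.getD_foldl_modify_append]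
    simp [List.filter_map, Function.comp_def]
  rw [PySem.Dict.items_eq_map_keys d hnd [], hkeys]
  apply List.map_congr_left
  intro k hk
  have hk' : k ∈ F.map pvKey := (PySem.Set.mem_ofList _ _).mp hk
  obtain ⟨w0, hw0, hkw0⟩ := List.mem_map.mp hk'
  have hkne : k ≠ "" := by
    have := List.of_mem_filter hw0
    simp at this
    rw [← hkw0]; exact this
  refine Prod.ext rfl ?_
  rw [hget k, hF, List.filter_filter]
  apply List.filter_congr
  intro w _
  by_cases h : pvKey w = k
  · simp [h, hkne]
  · simp [h]
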